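-- pv_equiv track=rewrite | github.com/walton8992/Final_submission | utilities.py | dict_combine_cpde
-- ===== SOURCE A (Python) =====
-- def dict_combine_cpde(list_cp, combine=False):
--     """Get all from list of tuples to dict.
--
--     This should return dict in format of each site,
--     each variable and then each cpde detected for that variable
--
--     Returns:
--         -dict
--     """
--     test = {}
--     for name, dic in list_cp:
--         if name not in test.keys():
--             test[name] = dic
--         else:
--             list_dic = list(dic.items())
--             for item in list_dic:
--                 # HINT item here is a tuple of
--                 # variable and the cost function cPD detected
--
--                 test[name][item[0]] = item[1]
--
--     return test
-- ===== SOURCE B (Python) =====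
-- def dict_combine_cpde(list_cp, combine=False):
--     """Group-then-merge: first collect each name's dicts in encounter order,
--     then merge each group onto its first dict (mutated in place, like A)."""
--     groups = {}
--     for name, dic in list_cp:
--         groups.setdefault(name, []).append(dic)
--     test = {}
--     for name, ds in groups.items():
--         base = ds[0]
--         for d in ds[1:]:
--             base.update(d)
--         test[name] = base
--     return test
-- ===== Notes on version B (the rewrite author's own statement) =====
-- stated objective: alternative
-- what changed: A merges in one interleaved pass (insert-or-update per tuple); B first groups all dicts by name in encounter order, then merges each group onto its first dict in a separate pass.
import Mathlib
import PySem

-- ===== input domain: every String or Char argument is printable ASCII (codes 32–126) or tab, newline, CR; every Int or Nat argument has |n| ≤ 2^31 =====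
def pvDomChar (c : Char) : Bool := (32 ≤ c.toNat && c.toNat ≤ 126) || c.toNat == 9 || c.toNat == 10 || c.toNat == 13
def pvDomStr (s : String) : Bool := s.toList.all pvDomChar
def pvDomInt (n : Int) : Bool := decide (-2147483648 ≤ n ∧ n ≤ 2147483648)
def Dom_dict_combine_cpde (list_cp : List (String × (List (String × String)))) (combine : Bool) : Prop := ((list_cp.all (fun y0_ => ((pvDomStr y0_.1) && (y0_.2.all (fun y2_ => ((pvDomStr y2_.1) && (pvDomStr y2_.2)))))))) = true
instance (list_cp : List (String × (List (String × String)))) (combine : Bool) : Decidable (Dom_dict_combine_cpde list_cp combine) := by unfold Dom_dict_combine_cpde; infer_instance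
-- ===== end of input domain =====

-- B restructures A's single interleaved insert-or-update pass into group-by-name then merge-each-group; return values proved equal.
-- (A stores and mutates the caller's inner dicts in place; B mutates the first dict of each group the same way — equivalence here is about the return value.)

-- Python dict assignment d[k] = v, on the items list (overwrite in place, new key appends)
def pvDictSet (l : List (String × String)) (k v : String) : List (String × String) :=
  ((PySem.Dict.mk l).insert k v).items

-- ===== PORT A =====
def dict_combine_cpde (list_cp : List (String × (List (String × String)))) (combine : Bool) : List (String × List (String × String)) :=
  (list_cp.foldl
    (fun test p =>
      if test.contains p.1 = false then
        test.insert p.1 p.2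
      else
        p.2.foldl (fun t kv => t.modify p.1 [] (fun inner => pvDictSet inner kv.1 kv.2)) test)
    (PySem.Dict.empty : PySem.Dict String (List (String × String)))).items

-- ===== PORT B =====
-- base = ds[0]; for d in ds[1:]: base.update(d)
def pvMergeGroup : List (List (String × String)) → List (String × String)
  | [] => []
  | h :: t => t.foldl (fun base d => d.foldl (fun b kv => pvDictSet b kv.1 kv.2) base) h

def dict_combine_cpde_alt (list_cp : List (String × (List (String × String)))) (combine : Bool) : List (String × List (String × String)) :=
  let groups := list_cp.foldl
    (fun d p => d.modify p.1 [] (fun ds => ds ++ [p.2]))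
    (PySem.Dict.empty : PySem.Dict String (List (List (String × String))))
  (groups.items.foldl
    (fun test p => test.insert p.1 (pvMergeGroup p.2))
    (PySem.Dict.empty : PySem.Dict String (List (String × String)))).items

-- ===== PRECONDITION & SPEC =====
def Spec_dict_combine_cpde (list_cp : List (String × (List (String × String)))) (combine : Bool) (out : List (String × List (String × String))) : Prop := out = dict_combine_cpde_alt list_cp combine
instance (list_cp : List (String × (List (String × String)))) (combine : Bool) (out : List (String × List (String × String))) : Decidable (Spec_dict_combine_cpde list_cp combine out) := by unfold Spec_dict_combine_cpde; infer_instance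

-- ===== CLAIM (what is proved, stated in full; the proofs are below) =====
def Claim_equal_dict_combine_cpde : Prop := ∀ (list_cp : List (String × (List (String × String)))) (combine : Bool), Dom_dict_combine_cpde list_cp combine → Spec_dict_combine_cpde list_cp combine (dict_combine_cpde list_cp combine)

-- ===== LEMMAS AND PROOFS =====

-- "merge each group" applied to every entry of the grouping dict
def pvMM (g : PySem.Dict String (List (List (String × String)))) : PySem.Dict String (List (String × String)) :=
  PySem.Dict.mk (g.items.map (fun p => (p.1, pvMergeGroup p.2)))

lemma pvMM_contains (g : PySem.Dict String (List (List (String × String)))) (k : String) :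
    (pvMM g).contains k = g.contains k := by
  simp [pvMM, PySem.Dict.contains, List.any_map, Function.comp_def]

lemma pvMM_keys (g : PySem.Dict String (List (List (String × String)))) :
    (pvMM g).keys = g.keys := by
  simp [pvMM, PySem.Dict.keys, List.map_map, Function.comp]

lemma pvMM_get? (g : PySem.Dict String (List (List (String × String)))) (k : String) :
    (pvMM g).get? k = (g.get? k).map pvMergeGroup := by
  cases g with
  | mk l =>
    induction l with
    | nil => rfl
    | cons q rest ih =>
      obtain ⟨qk, qv⟩ := q
      by_cases h : qk == k
      · simp [pvMM, PySem.Dict.get?_mk_cons, h]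
      · simpa [pvMM, PySem.Dict.get?_mk_cons, h] using ih

lemma pvMM_insert (g : PySem.Dict String (List (List (String × String)))) (k : String)
    (v : List (List (String × String))) :
    pvMM (g.insert k v) = (pvMM g).insert k (pvMergeGroup v) := by
  apply PySem.Dict.ext
  by_cases hc : g.contains k = true
  · rw [show (pvMM (g.insert k v)).items = (g.insert k v).items.map (fun p => (p.1, pvMergeGroup p.2)) from rfl,
      PySem.Dict.items_insert_of_contains _ _ hc,
      PySem.Dict.items_insert_of_contains _ _ (by rw [pvMM_contains]; exact hc)]
    simp only [pvMM, List.map_map]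
    apply List.map_congr_left
    intro q _
    by_cases h : q.1 == k <;> simp [Function.comp, h]
  · rw [show (pvMM (g.insert k v)).items = (g.insert k v).items.map (fun p => (p.1, pvMergeGroup p.2)) from rfl,
      PySem.Dict.items_insert_of_not_contains _ _ (by simpa using hc),
      PySem.Dict.items_insert_of_not_contains _ _ (by rw [pvMM_contains]; simpa using hc)]
    simp [pvMM]

-- a dict already containing k is unchanged by re-inserting its own value
lemma insert_getD_self (d : PySem.Dict String (List (String × String))) (k : String)
    (hnd : d.keys.Nodup) (hc : d.contains k = true) :
    d.insert k (d.getD k []) = d := by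
  apply PySem.Dict.ext
  rw [PySem.Dict.items_insert_of_contains _ _ hc]
  conv_rhs => rw [← List.map_id d.items]
  apply List.map_congr_left
  intro q hq
  by_cases h : q.1 == k
  · have hk : q.1 = k := by simpa using h
    have : d.getD q.1 [] = q.2 := PySem.Dict.getD_of_mem_items _ (by simpa using hq) hnd _
    simp only [h, if_true, id]
    rw [← hk, this]
  · simp [h]

-- A's inner loop (repeated modify at one key) collapses to a single insert
lemma foldl_modify_chain (l : List (String × String)) :
    ∀ (d : PySem.Dict String (List (String × String))) (k : String),
      d.keys.Nodup → d.contains k = true →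
      l.foldl (fun t kv => t.modify k [] (fun inner => pvDictSet inner kv.1 kv.2)) d
        = d.insert k (l.foldl (fun b kv => pvDictSet b kv.1 kv.2) (d.getD k [])) := by
  induction l with
  | nil => intro d k hnd hc; exact (insert_getD_self d k hnd hc).symm
  | cons kv l ih =>
    intro d k hnd hc
    have hmod : d.modify k [] (fun inner => pvDictSet inner kv.1 kv.2)
        = d.insert k (pvDictSet (d.getD k []) kv.1 kv.2) := rfl
    simp only [List.foldl_cons, hmod]
    rw [ih _ k (PySem.Dict.nodup_keys_insert _ _ _ hnd) (PySem.Dict.contains_insert_self _ _ _),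
      PySem.Dict.getD_insert_self, PySem.Dict.insert_insert_self]

lemma mergeGroup_append (v : List (List (String × String))) (d : List (String × String))
    (hv : v ≠ []) :
    pvMergeGroup (v ++ [d]) = d.foldl (fun b kv => pvDictSet b kv.1 kv.2) (pvMergeGroup v) := by
  match v with
  | [] => exact absurd rfl hv
  | h :: t => simp [pvMergeGroup, List.foldl_append]

-- main invariant: A's running dict is the merged image of B's grouping dict
lemma main_invariant (l : List (String × List (String × String))) :
    ∀ (g : PySem.Dict String (List (List (String × String)))),
      g.keys.Nodup → (∀ q ∈ g.items, q.2 ≠ []) →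
      l.foldl
        (fun test p =>
          if test.contains p.1 = false then
            test.insert p.1 p.2
          else
            p.2.foldl (fun t kv => t.modify p.1 [] (fun inner => pvDictSet inner kv.1 kv.2)) test)
        (pvMM g)
      = pvMM (l.foldl (fun d p => d.modify p.1 [] (fun ds => ds ++ [p.2])) g) := by
  induction l with
  | nil => intro g _ _; rfl
  | cons p l ih =>
    intro g hnd hne
    have hmod : g.modify p.1 [] (fun ds => ds ++ [p.2]) = g.insert p.1 (g.getD p.1 [] ++ [p.2]) := rfl
    by_cases hc : g.contains p.1 = true
    · -- name already present: A updates in place, B appends to the group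
      obtain ⟨v, hv⟩ : ∃ v, g.get? p.1 = some v := by
        have := PySem.Dict.contains_eq_isSome_get? g p.1
        rw [hc] at this
        exact Option.isSome_iff_exists.mp this.symm
      have hvne : v ≠ [] := hne _ (PySem.Dict.mem_items_of_get?_eq_some _ hv)
      have hgetD : g.getD p.1 [] = v := PySem.Dict.getD_of_get?_eq_some _ _ hv
      have hmmD : (pvMM g).getD p.1 [] = pvMergeGroup v := by
        rw [PySem.Dict.getD_eq_get?_getD, pvMM_get?, hv]; rfl
      simp only [List.foldl_cons, pvMM_contains, hc, Bool.true_eq_false, if_false]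
      rw [foldl_modify_chain p.2 (pvMM g) p.1 (by rw [pvMM_keys]; exact hnd)
          (by rw [pvMM_contains]; exact hc), hmmD, hmod, hgetD,
        ← mergeGroup_append v p.2 hvne, ← pvMM_insert]
      exact ih _ (PySem.Dict.nodup_keys_insert _ _ _ hnd)
        (fun q hq => by
          rcases (PySem.Dict.mem_items_insert _ _ _ _).mp hq with h | h
          · rw [h]; simp
          · exact hne _ h.1)
    · -- new name: both sides append a fresh entry
      have hc' : g.contains p.1 = false := by simpa using hc
      have hgetD : g.getD p.1 [] = [] := PySem.Dict.getD_of_not_contains _ _ hc'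
      simp only [List.foldl_cons, pvMM_contains, hc']
      rw [hmod, hgetD, List.nil_append,
        show (pvMM g).insert p.1 p.2 = (pvMM g).insert p.1 (pvMergeGroup [p.2]) from rfl,
        ← pvMM_insert]
      exact ih _ (PySem.Dict.nodup_keys_insert _ _ _ hnd)
        (fun q hq => by
          rcases (PySem.Dict.mem_items_insert _ _ _ _).mp hq with h | h
          · rw [h]; simp
          · exact hne _ h.1)

-- ===== VERDICT (by name: the statement is the Claim_ definition above) =====
theorem dict_combine_cpde_spec : Claim_equal_dict_combine_cpde := by
  unfold Claim_equal_dict_combine_cpde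
  intro list_cp combine _
  unfold Spec_dict_combine_cpde dict_combine_cpde dict_combine_cpde_alt
  have hG := main_invariant list_cp PySem.Dict.empty (PySem.Dict.nodup_keys_empty)
    (fun q hq => by cases hq)
  have hMMempty : pvMM PySem.Dict.empty = PySem.Dict.empty := rfl
  rw [hMMempty] at hG
  set G := list_cp.foldl (fun d p => d.modify p.1 [] (fun ds => ds ++ [p.2])) PySem.Dict.empty with hGdef
  have hndG : G.keys.Nodup := by
    exact PySem.Dict.nodup_keys_foldl_modify_key list_cp (fun p => p.1) []
      (fun d p ds => ds ++ [p.2]) PySem.Dict.empty PySem.Dict.nodup_keys_empty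
  rw [hG]
  rw [PySem.Dict.items_foldl_insert_fresh (l := G.items) (k := fun p => p.1)
      (v := fun p => pvMergeGroup p.2) (d := PySem.Dict.empty)
      (fun a _ => PySem.Dict.contains_empty _) (by simpa [PySem.Dict.keys] using hndG)]
  rfl
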